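-- pv_equiv track=rewrite | github.com/brandon-moy/algorithm-practice | CodeSignalPY/matrixElementSum.py | solution
-- ===== SOURCE A (Python) =====
-- def solution(matrix):
--     output = 0
--     for i in range(len(matrix)):
--         for j in range(len(matrix[i])):
--             if matrix[i][j] == 0 and i+1 < len(matrix):
--                 matrix[i+1][j] = 0
--             output += matrix[i][j]
--     return output
-- ===== SOURCE B (Python) =====
-- def solution(matrix):
--     # Column-major pass with a per-column 'zeroed' flag instead of mutate-then-reread.
--     # Performs the same in-place zeroing as A on inputs where A returns.
--     total = 0
--     width = max((len(row) for row in matrix), default=0)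
--     for j in range(width):
--         zeroed = False
--         for i in range(len(matrix)):
--             row = matrix[i]
--             if j < len(row):
--                 if zeroed:
--                     row[j] = 0
--                 elif row[j] == 0:
--                     zeroed = True
--                 total += row[j]
--     return total
-- ===== Notes on version B (the rewrite author's own statement) =====
-- stated objective: alternative
-- what changed: B traverses the matrix column by column keeping a per-column boolean 'zeroed' flag instead of A's row-major pass that mutates the matrix and re-reads the mutated cells; B also guards every access so it never raises.
import Mathlib
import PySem

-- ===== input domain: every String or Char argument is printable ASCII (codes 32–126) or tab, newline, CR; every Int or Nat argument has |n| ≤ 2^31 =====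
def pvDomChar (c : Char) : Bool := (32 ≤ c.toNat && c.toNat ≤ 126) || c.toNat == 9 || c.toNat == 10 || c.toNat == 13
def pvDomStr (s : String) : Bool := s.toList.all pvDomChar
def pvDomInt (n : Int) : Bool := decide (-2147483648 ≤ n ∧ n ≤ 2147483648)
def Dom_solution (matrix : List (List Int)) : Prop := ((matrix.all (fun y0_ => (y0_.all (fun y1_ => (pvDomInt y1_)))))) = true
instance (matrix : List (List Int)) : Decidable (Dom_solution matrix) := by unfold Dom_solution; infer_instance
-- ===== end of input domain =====

-- B re-implements A column-by-column with a per-column 'zeroed' flag instead of A's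
-- mutate-then-reread row-major pass; equal return value on all inputs where A returns
-- (B also performs the same in-place zeroing in Python; the theorems are about the return value).

-- ===== PORT A =====
def pvRowL (m : List (List Int)) (i : Nat) : List Int := m.getD i []
def pvCell (m : List (List Int)) (i j : Nat) : Int := (pvRowL m i).getD j 0
def pvSetCell (m : List (List Int)) (i j : Nat) : List (List Int) :=
  m.set i ((pvRowL m i).set j 0)
-- the write `matrix[i+1][j] = 0`; out-of-range writes are Python IndexErrors, excluded by Pre_
def pvW (n i : Nat) (mm : List (List Int)) (j : Nat) : List (List Int) :=
  if pvCell mm i j = 0 ∧ i + 1 < n then pvSetCell mm (i + 1) j else mm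
-- one inner-loop iteration of A: the guarded write, then `output += matrix[i][j]`
def pvInner (n i : Nat) (st : List (List Int) × Int) (j : Nat) : List (List Int) × Int :=
  (pvW n i st.1 j, st.2 + pvCell (pvW n i st.1 j) i j)
def pvOuter (n : Nat) (st : List (List Int) × Int) (i : Nat) : List (List Int) × Int :=
  (List.range (pvRowL st.1 i).length).foldl (pvInner n i) st

def solution (matrix : List (List Int)) : Int :=
  ((List.range matrix.length).foldl (pvOuter matrix.length) (matrix, 0)).2

-- ===== PORT B =====
-- one row step of B's column pass: flag, then `total += row[j]`
def pvBStep (m : List (List Int)) (j : Nat) (st : Bool × Int) (i : Nat) : Bool × Int :=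
  let row := pvRowL m i
  if j < row.length then
    if st.1 then (true, st.2 + 0)
    else if row.getD j 0 = 0 then (true, st.2 + row.getD j 0)
    else (st.1, st.2 + row.getD j 0)
  else st

def solution_alt (matrix : List (List Int)) : Int :=
  let width := (matrix.map List.length).foldl Nat.max 0
  (List.range width).foldl
    (fun total j => ((List.range matrix.length).foldl (pvBStep matrix j) (false, total)).2) 0

-- ===== PRECONDITION & SPEC =====
-- Pre_ excludes exactly the inputs on which A raises IndexError: a zero at (i',j) whose
-- downward propagation meets a row i+1 too short to hold column j.
def Pre_solution (matrix : List (List Int)) : Prop :=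
  ∀ i < matrix.length, ∀ i' ≤ i, ∀ j < (pvRowL matrix i').length,
    pvCell matrix i' j = 0 → i + 1 < matrix.length → j < (pvRowL matrix (i + 1)).length
instance (matrix : List (List Int)) : Decidable (Pre_solution matrix) := by
  unfold Pre_solution; infer_instance
def pvWitness_solution : List (List Int) := [[1, 0], [2, 3]]

def Spec_solution (matrix : List (List Int)) (out : Int) : Prop := out = solution_alt matrix
instance (matrix : List (List Int)) (out : Int) : Decidable (Spec_solution matrix out) := by
  unfold Spec_solution; infer_instance

-- ===== CLAIM (what is proved, stated in full; the proofs are below) =====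
def Claim_equal_solution : Prop :=
  ∀ (matrix : List (List Int)), Dom_solution matrix → Pre_solution matrix →
    Spec_solution matrix (solution matrix)

-- ===== LEMMAS AND PROOFS =====

-- `zeroed` flag of column j after the first i rows: some earlier row has a zero in column j
def pvZB (m : List (List Int)) (j : Nat) : Nat → Bool
  | 0 => false
  | i + 1 => pvZB m j i || (decide (j < (pvRowL m i).length) && decide (pvCell m i j = 0))
-- the value cell (i,j) holds when A's pass reads it (under Pre_)
def pvVal (m : List (List Int)) (i j : Nat) : Int :=
  if pvZB m j i then 0 else pvCell m i j
def pvEff (m : List (List Int)) (i : Nat) : List Int :=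
  (List.range (pvRowL m i).length).map (pvVal m i)
def pvSumR (k : Nat) (f : Nat → Int) : Int := ((List.range k).map f).sum

lemma pvSumR_succ (k : Nat) (f : Nat → Int) : pvSumR (k + 1) f = pvSumR k f + f k := by
  simp [pvSumR, List.range_succ]

lemma pvSumR_congr {k : Nat} {f g : Nat → Int} (h : ∀ j < k, f j = g j) :
    pvSumR k f = pvSumR k g := by
  unfold pvSumR
  congr 1
  exact List.map_congr_left (fun j hj => h j (List.mem_range.mp hj))

lemma getD_set {α : Type} (l : List α) (a : Nat) (x : α) (t : Nat) (d : α) :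
    (l.set a x).getD t d = if a = t ∧ a < l.length then x else l.getD t d := by
  simp [List.getD, List.getElem?_set]
  split_ifs <;> simp_all
  omega

lemma rowL_setCell (mm : List (List Int)) (a j t : Nat) :
    pvRowL (pvSetCell mm a j) t =
      if a = t then (pvRowL mm t).set j 0 else pvRowL mm t := by
  simp only [pvSetCell, pvRowL, getD_set]
  by_cases h1 : a = t
  · subst h1
    by_cases h2 : a < mm.length
    · simp [h2]
    · simp [h2]
  · simp [h1]

lemma rowL_pvW_ne (n i : Nat) (mm : List (List Int)) (j t : Nat) (h : t ≠ i + 1) :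
    pvRowL (pvW n i mm j) t = pvRowL mm t := by
  unfold pvW
  split
  · rw [rowL_setCell, if_neg (Ne.symm h)]
  · rfl

lemma pvW_apply (n i : Nat) (mm : List (List Int)) (j : Nat) :
    pvW n i mm j =
      if pvCell mm i j = 0 ∧ i + 1 < n then pvSetCell mm (i + 1) j else mm := rfl

lemma zb_iff (m : List (List Int)) (j i : Nat) :
    pvZB m j i = true ↔ ∃ i' < i, j < (pvRowL m i').length ∧ pvCell m i' j = 0 := by
  induction i with
  | zero => simp [pvZB]
  | succ i ih =>
    simp only [pvZB, Bool.or_eq_true, Bool.and_eq_true, decide_eq_true_eq, ih]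
    constructor
    · rintro (⟨i', h1, h2, h3⟩ | ⟨h2, h3⟩)
      · exact ⟨i', by omega, h2, h3⟩
      · exact ⟨i, by omega, h2, h3⟩
    · rintro ⟨i', h1, h2, h3⟩
      rcases Nat.lt_succ_iff_lt_or_eq.mp h1 with h | h
      · exact Or.inl ⟨i', h, h2, h3⟩
      · subst h; exact Or.inr ⟨h2, h3⟩

lemma pre_chain {m : List (List Int)} (hP : Pre_solution m) (t j : Nat)
    (ht : t < m.length) (hz : pvZB m j t = true) : j < (pvRowL m t).length := by
  cases t with
  | zero => simp [pvZB] at hz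
  | succ t =>
    obtain ⟨i', h1, h2, h3⟩ := (zb_iff m j (t + 1)).mp hz
    exact hP t (by omega) i' (by omega) j h2 h3 ht

lemma zb_val_iff {m : List (List Int)} (hP : Pre_solution m) (i j : Nat)
    (hi : i + 1 < m.length) :
    pvZB m j (i + 1) = true ↔ (j < (pvRowL m i).length ∧ pvVal m i j = 0) := by
  constructor
  · intro h
    cases hz : pvZB m j i with
    | true => exact ⟨pre_chain hP i j (by omega) hz, by simp [pvVal, hz]⟩
    | false =>
      simp only [pvZB, hz, Bool.false_or, Bool.and_eq_true, decide_eq_true_eq] at h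
      exact ⟨h.1, by simp [pvVal, hz, h.2]⟩
  · rintro ⟨hl, hv⟩
    cases hz : pvZB m j i with
    | true => simp [pvZB, hz]
    | false =>
      simp only [pvVal, hz, if_false, Bool.false_eq_true] at hv
      simp [pvZB, hz, hv, hl]

lemma map_getD_range (l : List Int) :
    (List.range l.length).map (fun j => l.getD j 0) = l := by
  refine List.ext_getElem (by simp) ?_
  intro i h1 h2
  simp [List.getD, List.getElem?_eq_getElem h2]

lemma eff_length (m : List (List Int)) (i : Nat) :
    (pvEff m i).length = (pvRowL m i).length := by
  simp [pvEff]

lemma eff_getD (m : List (List Int)) (i j : Nat) (h : j < (pvRowL m i).length) :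
    (pvEff m i).getD j 0 = pvVal m i j := by
  have hlen : j < (pvEff m i).length := by simpa [eff_length] using h
  rw [List.getD_eq_getElem _ 0 hlen]
  simp [pvEff]

lemma eff_zero_row (m : List (List Int)) : pvEff m 0 = pvRowL m 0 := by
  unfold pvEff
  calc (List.range (pvRowL m 0).length).map (pvVal m 0)
      = (List.range (pvRowL m 0).length).map (fun j => (pvRowL m 0).getD j 0) := by
        refine List.map_congr_left (fun j _ => ?_)
        simp [pvVal, pvZB, pvCell]
    _ = pvRowL m 0 := map_getD_range _

lemma eff_out (m : List (List Int)) (i : Nat) (h : m.length ≤ i) :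
    pvEff m i = pvRowL m i := by
  unfold pvEff pvRowL
  rw [List.getD_eq_default _ _ h]
  simp

lemma wfold_rows (n i : Nat) : ∀ (L : Nat) (mm : List (List Int)) (t : Nat),
    pvRowL ((List.range L).foldl (pvW n i) mm) t =
      if t = i + 1 then
        (List.range L).foldl
          (fun r j => if pvCell mm i j = 0 ∧ i + 1 < n then r.set j 0 else r)
          (pvRowL mm (i + 1))
      else pvRowL mm t := by
  intro L
  induction L with
  | zero => intro mm t; by_cases h : t = i + 1 <;> simp [h]
  | succ L ih =>
    intro mm t
    simp only [List.range_succ, List.foldl_append, List.foldl_cons, List.foldl_nil]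
    have hcell : pvCell ((List.range L).foldl (pvW n i) mm) i L = pvCell mm i L := by
      unfold pvCell
      rw [ih mm i, if_neg (by omega)]
    have hstep : pvW n i ((List.range L).foldl (pvW n i) mm) L
        = if pvCell mm i L = 0 ∧ i + 1 < n then
            pvSetCell ((List.range L).foldl (pvW n i) mm) (i + 1) L
          else (List.range L).foldl (pvW n i) mm := by
      rw [pvW_apply, hcell]
    rw [hstep]
    by_cases hcond : pvCell mm i L = 0 ∧ i + 1 < n
    · rw [if_pos hcond, rowL_setCell]
      by_cases ht : t = i + 1
      · rw [if_pos (show i + 1 = t from ht.symm), if_pos ht, if_pos hcond, ht,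
          ih mm (i + 1), if_pos rfl]
      · rw [if_neg (fun hh => ht hh.symm), if_neg ht, ih mm t, if_neg ht]
    · rw [if_neg hcond]
      by_cases ht : t = i + 1
      · rw [if_pos ht, if_neg hcond, ih mm t, if_pos ht]
      · rw [if_neg ht, ih mm t, if_neg ht]

lemma inner_split (n i : Nat) : ∀ (L : Nat) (mm : List (List Int)) (t : Int),
    (List.range L).foldl (pvInner n i) (mm, t) =
      ((List.range L).foldl (pvW n i) mm, t + pvSumR L (fun j => pvCell mm i j)) := by
  intro L
  induction L with
  | zero => intro mm t; simp [pvSumR]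
  | succ L ih =>
    intro mm t
    simp only [List.range_succ, List.foldl_append, List.foldl_cons, List.foldl_nil, ih]
    have hrow : pvCell (pvW n i ((List.range L).foldl (pvW n i) mm) L) i L
        = pvCell mm i L := by
      unfold pvCell
      rw [rowL_pvW_ne n i _ L i (by omega), wfold_rows n i L mm i, if_neg (by omega)]
    simp only [pvInner, hrow, pvSumR_succ, Prod.mk.injEq]
    exact ⟨trivial, by ring⟩

lemma setfold_length (c : Nat → Prop) [DecidablePred c] :
    ∀ (L : Nat) (r : List Int),
      ((List.range L).foldl (fun r j => if c j then r.set j 0 else r) r).length = r.length := by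
  intro L
  induction L with
  | zero => intro r; simp
  | succ L ih =>
    intro r
    simp only [List.range_succ, List.foldl_append, List.foldl_cons, List.foldl_nil]
    split
    · rw [List.length_set, ih]
    · rw [ih]

lemma setfold_getD (c : Nat → Prop) [DecidablePred c] :
    ∀ (L : Nat) (r : List Int) (t : Nat),
      ((List.range L).foldl (fun r j => if c j then r.set j 0 else r) r).getD t 0 =
        if t < L ∧ c t ∧ t < r.length then 0 else r.getD t 0 := by
  intro L
  induction L with
  | zero => intro r t; simp
  | succ L ih =>
    intro r t
    simp only [List.range_succ, List.foldl_append, List.foldl_cons, List.foldl_nil]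
    by_cases hc : c L
    · rw [if_pos hc, getD_set, setfold_length c L r, ih]
      by_cases h1 : t = L
      · subst h1
        by_cases h2 : t < r.length
        · rw [if_pos ⟨rfl, h2⟩, if_pos ⟨by omega, hc, h2⟩]
        · rw [if_neg (fun hh => h2 hh.2), if_neg (by omega), if_neg (by omega)]
      · rw [if_neg (fun hh => h1 hh.1.symm)]
        by_cases h3 : t < L ∧ c t ∧ t < r.length
        · rw [if_pos h3, if_pos ⟨by omega, h3.2⟩]
        · rw [if_neg h3, if_neg (by
            rintro ⟨hh1, hh2⟩
            exact h3 ⟨by omega, hh2⟩)]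
    · rw [if_neg hc, ih]
      by_cases h3 : t < L ∧ c t ∧ t < r.length
      · rw [if_pos h3, if_pos ⟨by omega, h3.2⟩]
      · rw [if_neg h3, if_neg (by
          rintro ⟨hh1, hh2, hh3⟩
          rcases Nat.lt_succ_iff_lt_or_eq.mp hh1 with h | h
          · exact h3 ⟨h, hh2, hh3⟩
          · subst h; exact hc hh2)]

lemma wrow_eq_eff {m : List (List Int)} (hP : Pre_solution m) (i : Nat)
    (hi : i + 1 < m.length) {mm : List (List Int)} (hrow : pvRowL mm i = pvEff m i) :
    (List.range (pvRowL m i).length).foldl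
        (fun r j => if pvCell mm i j = 0 ∧ i + 1 < m.length then r.set j 0 else r)
        (pvRowL m (i + 1)) = pvEff m (i + 1) := by
  have hlen : ((List.range (pvRowL m i).length).foldl
      (fun r j => if pvCell mm i j = 0 ∧ i + 1 < m.length then r.set j 0 else r)
      (pvRowL m (i + 1))).length = (pvRowL m (i + 1)).length :=
    setfold_length _ _ _
  refine List.ext_getElem (by rw [hlen, eff_length]) ?_
  intro t h1 h2
  rw [← List.getD_eq_getElem _ 0 h1, ← List.getD_eq_getElem _ 0 h2]
  have ht1 : t < (pvRowL m (i + 1)).length := by rwa [hlen] at h1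
  rw [setfold_getD _ _ _ _, eff_getD m (i + 1) t ht1]
  have hmmcell : ∀ j, j < (pvRowL m i).length → pvCell mm i j = pvVal m i j := by
    intro j hj
    unfold pvCell
    rw [hrow, eff_getD m i j hj]
  cases hz : pvZB m t (i + 1) with
  | true =>
    obtain ⟨hl, hv⟩ := (zb_val_iff hP i t hi).mp hz
    rw [if_pos ⟨hl, ⟨by rw [hmmcell t hl]; exact hv, hi⟩, pre_chain hP (i + 1) t hi hz⟩]
    simp [pvVal, hz]
  | false =>
    rw [if_neg (by
      rintro ⟨hh1, ⟨hh2, _⟩, _⟩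
      have : pvVal m i t = 0 := by rw [← hmmcell t hh1]; exact hh2
      rw [(zb_val_iff hP i t hi).mpr ⟨hh1, this⟩] at hz
      exact absurd hz (by simp))]
    simp [pvVal, hz, pvCell]

lemma foldl_keep {α β : Type} : ∀ (l : List β) (r : α), l.foldl (fun r _ => r) r = r := by
  intro l
  induction l with
  | nil => intro r; rfl
  | cons x l ih => intro r; exact ih r

lemma outer_inv {m : List (List Int)} (hP : Pre_solution m) :
    ∀ i, i ≤ m.length →
      (∀ t, pvRowL ((List.range i).foldl (pvOuter m.length) (m, 0)).1 t =
          if t ≤ i then pvEff m t else pvRowL m t) ∧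
      ((List.range i).foldl (pvOuter m.length) (m, 0)).2 =
        pvSumR i (fun k => pvSumR (pvRowL m k).length (pvVal m k)) := by
  intro i
  induction i with
  | zero =>
    intro _
    refine ⟨?_, by simp [pvSumR]⟩
    intro t
    simp only [List.range_zero, List.foldl_nil]
    by_cases ht : t ≤ 0
    · rw [if_pos ht, Nat.le_zero.mp ht]
      exact (eff_zero_row m).symm
    · rw [if_neg ht]
  | succ i ih =>
    intro hle
    obtain ⟨hrows, hout⟩ := ih (by omega)
    rw [List.range_succ, List.foldl_append, List.foldl_cons, List.foldl_nil]
    set st := (List.range i).foldl (pvOuter m.length) (m, 0) with hst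
    have hrowi : pvRowL st.1 i = pvEff m i := by rw [hrows i, if_pos le_rfl]
    have hL : (pvRowL st.1 i).length = (pvRowL m i).length := by
      rw [hrowi, eff_length]
    have houter : pvOuter m.length st i =
        ((List.range (pvRowL m i).length).foldl (pvW m.length i) st.1,
          st.2 + pvSumR (pvRowL m i).length (fun j => pvCell st.1 i j)) := by
      unfold pvOuter
      rw [hL, ← Prod.mk.eta (p := st), inner_split]
    rw [houter]
    constructor
    · intro t
      rw [wfold_rows]
      by_cases ht : t = i + 1
      · rw [if_pos ht, ht, if_pos le_rfl]
        have hbase : pvRowL st.1 (i + 1) = pvRowL m (i + 1) := by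
          rw [hrows (i + 1), if_neg (by omega)]
        by_cases hi1 : i + 1 < m.length
        · rw [hbase]
          exact wrow_eq_eff hP i hi1 hrowi
        · have hfix : (fun (r : List Int) (j : Nat) =>
              if pvCell st.1 i j = 0 ∧ i + 1 < m.length then r.set j 0 else r) =
              fun (r : List Int) _ => r := by
            funext r j
            rw [if_neg (fun hh => hi1 hh.2)]
          rw [hfix, foldl_keep, hbase, eff_out m (i + 1) (by omega)]
      · rw [if_neg ht, hrows t]
        by_cases ht2 : t ≤ i
        · rw [if_pos ht2, if_pos (by omega)]
        · rw [if_neg ht2, if_neg (by omega)]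
    · dsimp only
      rw [hout, pvSumR_succ]
      congr 1
      refine pvSumR_congr (fun j hj => ?_)
      unfold pvCell
      rw [hrowi, eff_getD m i j hj]

lemma solution_eq_sum {m : List (List Int)} (hP : Pre_solution m) :
    solution m = pvSumR m.length (fun k => pvSumR (pvRowL m k).length (pvVal m k)) := by
  exact (outer_inv hP m.length le_rfl).2

lemma alt_inner (m : List (List Int)) (j : Nat) : ∀ (k : Nat) (t : Int),
    (List.range k).foldl (pvBStep m j) (false, t) =
      (pvZB m j k,
       t + pvSumR k (fun i => if j < (pvRowL m i).length then pvVal m i j else 0)) := by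
  intro k
  induction k with
  | zero => intro t; simp [pvZB, pvSumR]
  | succ k ih =>
    intro t
    rw [List.range_succ, List.foldl_append, List.foldl_cons, List.foldl_nil, ih, pvSumR_succ]
    by_cases hlen : j < (pvRowL m k).length
    · by_cases hz : pvZB m j k = true
      · have hv : pvVal m k j = 0 := by simp [pvVal, hz]
        simp [pvBStep, pvZB, hlen, hz, hv]
      · have hzf : pvZB m j k = false := by simpa using hz
        have hget : (pvRowL m k)[j] = pvCell m k j := (List.getD_eq_getElem _ _ hlen).symm
        by_cases hc : pvCell m k j = 0
        · have hv : pvVal m k j = 0 := by simp [pvVal, hzf, hc]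
          simp [pvBStep, pvZB, hlen, hzf, hget, hc, hv]
        · have hv : pvVal m k j = pvCell m k j := by simp [pvVal, hzf]
          simp [pvBStep, pvZB, hlen, hzf, hget, hc, hv]
          ring
    · simp [pvBStep, pvZB, hlen]

lemma foldl_add_g : ∀ (l : List Nat) (t : Int) (g : Nat → Int),
    l.foldl (fun tt j => tt + g j) t = t + (l.map g).sum := by
  intro l
  induction l with
  | nil => intro t g; simp
  | cons x l ih => intro t g; simp [ih]; ring

lemma alt_eq_sum (m : List (List Int)) :
    solution_alt m =
      pvSumR ((m.map List.length).foldl Nat.max 0)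
        (fun j => pvSumR m.length
          (fun i => if j < (pvRowL m i).length then pvVal m i j else 0)) := by
  unfold solution_alt
  have hf : (fun (total : Int) (j : Nat) =>
      ((List.range m.length).foldl (pvBStep m j) (false, total)).2) =
      fun (total : Int) (j : Nat) =>
        total + pvSumR m.length
          (fun i => if j < (pvRowL m i).length then pvVal m i j else 0) := by
    funext total j
    rw [alt_inner m j m.length total]
  rw [hf, foldl_add_g]
  simp [pvSumR]

lemma le_foldl_max : ∀ (l : List Nat) (a : Nat), a ≤ l.foldl Nat.max a := by
  intro l
  induction l with
  | nil => intro a; simp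
  | cons x l ih =>
    intro a
    exact le_trans (Nat.le_max_left a x) (ih (Nat.max a x))

lemma mem_le_foldl_max : ∀ (l : List Nat) (a x : Nat), x ∈ l → x ≤ l.foldl Nat.max a := by
  intro l
  induction l with
  | nil => intro a x h; simp at h
  | cons y l ih =>
    intro a x h
    rcases List.mem_cons.mp h with h | h
    · subst h
      exact le_trans (Nat.le_max_right a x) (le_foldl_max l (Nat.max a x))
    · exact ih (Nat.max a y) x h

lemma len_le_width (m : List (List Int)) (i : Nat) (h : i < m.length) :
    (pvRowL m i).length ≤ (m.map List.length).foldl Nat.max 0 := by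
  have hmem : pvRowL m i ∈ m := by
    unfold pvRowL
    rw [List.getD_eq_getElem m [] h]
    exact List.getElem_mem h
  exact mem_le_foldl_max _ 0 _ (List.mem_map_of_mem hmem)

lemma sumR_eq_finset (k : Nat) (f : Nat → Int) :
    pvSumR k f = ∑ x ∈ Finset.range k, f x := by
  induction k with
  | zero => simp [pvSumR]
  | succ k ih => rw [pvSumR_succ, Finset.sum_range_succ, ih]

-- ===== VERDICT (by name: the statement is the Claim_ definition above) =====
theorem solution_spec : Claim_equal_solution := by
  intro m _ hP
  unfold Spec_solution
  rw [solution_eq_sum hP, alt_eq_sum]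
  simp only [sumR_eq_finset]
  rw [Finset.sum_comm]
  refine Finset.sum_congr rfl (fun i hi => ?_)
  have hW := len_le_width m i (Finset.mem_range.mp hi)
  calc ∑ j ∈ Finset.range (pvRowL m i).length, pvVal m i j
      = ∑ j ∈ Finset.range (pvRowL m i).length,
          (if j < (pvRowL m i).length then pvVal m i j else 0) := by
        refine Finset.sum_congr rfl (fun j hj => ?_)
        rw [if_pos (Finset.mem_range.mp hj)]
    _ = ∑ j ∈ Finset.range ((m.map List.length).foldl Nat.max 0),
          (if j < (pvRowL m i).length then pvVal m i j else 0) := by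
        refine Finset.sum_subset
          (fun x hx => Finset.mem_range.mpr (lt_of_lt_of_le (Finset.mem_range.mp hx) hW))
          (fun x _ hx => ?_)
        rw [if_neg (by simpa using hx)]
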